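-- pv_equiv track=rewrite | github.com/minhnhatphan/emotracker | utils.py | get_onscreen_and_break
-- ===== SOURCE A (Python) =====
-- def get_onscreen_and_break(low_activity):
--     assert len(low_activity) > 1
--
--     onscreen_time = []
--     breaks_time = []
--
--     is_break = False
--
--     for i in range(len(low_activity)):
--         if low_activity[i]:
--             if is_break:
--                 breaks_time[-1] += 1
--             elif (i < len(low_activity)-1 and low_activity[i+1]):
--                 is_break = True
--                 breaks_time.append(1)
--             else:
--                 if len(onscreen_time) == 0:
--                     onscreen_time.append(1)
--                 else:
--                     onscreen_time[-1] += 1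
--         else:
--             if not is_break:
--                 if len(onscreen_time) == 0:
--                     onscreen_time.append(1)
--                 else:
--                     onscreen_time[-1] += 1
--             else:
--                 onscreen_time.append(1)
--                 is_break = False
--
--     return onscreen_time, breaks_time
-- ===== SOURCE B (Python) =====
-- from itertools import groupby
--
--
-- def get_onscreen_and_break(low_activity):
--     assert len(low_activity) > 1
--     onscreen_time = []
--     breaks_time = []
--     gap = 0
--     for val, run in groupby(low_activity, key=bool):
--         n = sum(1 for _ in run)
--         if val and n >= 2:
--             if gap > 0:
--                 onscreen_time.append(gap)
--             breaks_time.append(n)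
--             gap = 0
--         else:
--             gap += n
--     if gap > 0:
--         onscreen_time.append(gap)
--     return onscreen_time, breaks_time
-- ===== Notes on version B (the rewrite author's own statement) =====
-- stated objective: idiomatic
-- what changed: Replaces A's index loop with lookahead low_activity[i+1] and an is_break flag machine mutating list tails by a run-length encoding via itertools.groupby walked once with a single gap counter (breaks = truthy runs of length >= 2, onscreen = the nonempty gaps between them).
import Mathlib
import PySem

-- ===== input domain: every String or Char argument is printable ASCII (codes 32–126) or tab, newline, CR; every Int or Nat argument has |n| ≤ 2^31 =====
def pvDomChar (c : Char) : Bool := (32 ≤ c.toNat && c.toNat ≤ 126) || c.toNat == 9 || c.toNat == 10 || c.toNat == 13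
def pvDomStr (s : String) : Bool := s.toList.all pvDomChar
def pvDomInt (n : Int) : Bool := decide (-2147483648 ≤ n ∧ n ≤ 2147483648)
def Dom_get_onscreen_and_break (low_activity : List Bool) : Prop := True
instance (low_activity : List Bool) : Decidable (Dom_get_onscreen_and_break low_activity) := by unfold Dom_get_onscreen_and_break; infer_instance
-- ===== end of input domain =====

-- B replaces A's index loop with a three-state flag machine by a run-length encoding
-- (itertools.groupby) walked with a single gap counter (objective: idiomatic/alternative; no speed claim).

-- ===== PORT A =====
-- xs[-1] += 1 on a nonempty list: increment the last element (A only uses it on nonempty lists)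
def pvIncLast : List Int → List Int
  | [] => []
  | [x] => [x + 1]
  | x :: xs => x :: pvIncLast xs

-- A's `if len(onscreen_time)==0: append(1) else: onscreen_time[-1]+=1`
def pvOnInc (on : List Int) : List Int := if on = [] then [1] else pvIncLast on

-- A's for-loop over i in range(len(low_activity)); rendered as structural recursion over the
-- list: `rest.head?` is low_activity[i+1] and `rest = []` is i = len-1, same values step for step.
def pvLoopA : List Int → List Int → Bool → List Bool → List Int × List Int
  | on, br, _, [] => (on, br)
  | on, br, isb, x :: rest =>
    if x then
      if isb then pvLoopA on (pvIncLast br) true rest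
      else if rest.head?.getD false then pvLoopA on (br ++ [1]) true rest
      else pvLoopA (pvOnInc on) br isb rest
    else
      if !isb then pvLoopA (pvOnInc on) br isb rest
      else pvLoopA (on ++ [1]) br false rest

def get_onscreen_and_break (low_activity : List Bool) : List Int × List Int :=
  pvLoopA [] [] false low_activity

-- ===== PORT B =====
-- run-length encoding (itertools.groupby): current run value x with count n so far
def pvRleAux (x : Bool) (n : Int) : List Bool → List (Bool × Int)
  | [] => [(x, n)]
  | y :: ys => if y = x then pvRleAux x (n + 1) ys else (x, n) :: pvRleAux y 1 ys

def pvRle : List Bool → List (Bool × Int)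
  | [] => []
  | x :: xs => pvRleAux x 1 xs

-- one iteration of B's loop over the (value, run-length) pairs
def pvStepB (st : List Int × List Int × Int) (r : Bool × Int) : List Int × List Int × Int :=
  if r.1 ∧ 2 ≤ r.2 then ((if 0 < st.2.2 then st.1 ++ [st.2.2] else st.1), st.2.1 ++ [r.2], 0)
  else (st.1, st.2.1, st.2.2 + r.2)

-- the trailing `if gap > 0: onscreen_time.append(gap)`
def pvFinishB (st : List Int × List Int × Int) : List Int × List Int :=
  ((if 0 < st.2.2 then st.1 ++ [st.2.2] else st.1), st.2.1)

def get_onscreen_and_break_alt (low_activity : List Bool) : List Int × List Int :=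
  pvFinishB (List.foldl pvStepB ([], [], 0) (pvRle low_activity))

-- ===== PRECONDITION & SPEC =====
-- A asserts len(low_activity) > 1 and raises AssertionError otherwise; Pre_ excludes exactly that.
def Pre_get_onscreen_and_break (low_activity : List Bool) : Prop := 1 < low_activity.length
instance (low_activity : List Bool) : Decidable (Pre_get_onscreen_and_break low_activity) := by
  unfold Pre_get_onscreen_and_break; infer_instance
def pvWitness_get_onscreen_and_break : List Bool := [true, false]
def Spec_get_onscreen_and_break (low_activity : List Bool) (out : List Int × List Int) : Prop := out = get_onscreen_and_break_alt low_activity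
instance (low_activity : List Bool) (out : List Int × List Int) : Decidable (Spec_get_onscreen_and_break low_activity out) := by unfold Spec_get_onscreen_and_break; infer_instance

-- ===== CLAIM (what is proved, stated in full; the proofs are below) =====
def Claim_equal_get_onscreen_and_break : Prop := ∀ (low_activity : List Bool), Dom_get_onscreen_and_break low_activity → Pre_get_onscreen_and_break low_activity → Spec_get_onscreen_and_break low_activity (get_onscreen_and_break low_activity)

-- ===== LEMMAS AND PROOFS =====

theorem pvIncLast_append (xs : List Int) (g : Int) : pvIncLast (xs ++ [g]) = xs ++ [g + 1] := by
  induction xs with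
  | nil => rfl
  | cons x xs ih =>
    cases xs with
    | nil => simp [pvIncLast]
    | cons y ys => simpa [pvIncLast] using ih

-- the representation of B's pending gap on A's side
def pvGapRep (g : Int) : List Int := if 0 < g then [g] else []

theorem pvOnInc_gapRep (on : List Int) (gap : Int) (hg : gap = 0 ∧ on = [] ∨ 0 < gap) :
    pvOnInc (on ++ pvGapRep gap) = on ++ pvGapRep (gap + 1) := by
  rcases hg with ⟨h0, hon⟩ | hpos
  · subst h0; subst hon; simp [pvOnInc, pvGapRep]
  · have h1 : 0 < gap + 1 := by omega
    rw [show pvGapRep gap = [gap] from if_pos hpos,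
      show pvGapRep (gap + 1) = [gap + 1] from if_pos h1]
    simp [pvOnInc, pvIncLast_append]

theorem pvStepB_false (ys : List Bool) (n : Int) (on br : List Int) (gap : Int) :
    List.foldl pvStepB (on, br, gap) (pvRleAux false n ys)
      = List.foldl pvStepB (on, br, gap + n) (pvRle ys) := by
  induction ys generalizing n gap with
  | nil => simp [pvRleAux, pvRle, pvStepB]
  | cons y ys ih =>
    cases y with
    | false =>
      rw [show pvRleAux false n (false :: ys) = pvRleAux false (n + 1) ys from by
        simp [pvRleAux]]
      rw [ih (n + 1) gap, show pvRle (false :: ys) = pvRleAux false 1 ys from rfl,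
        ih 1 (gap + n)]
      ring_nf
    | true =>
      rw [show pvRleAux false n (true :: ys) = (false, n) :: pvRleAux true 1 ys from by
        simp [pvRleAux]]
      simp [pvRle, pvStepB]

-- the main invariant, both modes at once, by induction on a length bound:
-- .1 : A outside a break, with B holding a pending gap (gap = 0 only at the very start);
-- .2 : A inside a break whose A-side count so far is n, B yet to process the whole run.
theorem pvMain (k : Nat) : ∀ (l : List Bool), l.length ≤ k →
    (∀ on br gap, (gap = 0 ∧ on = [] ∨ 0 < gap) →
      pvLoopA (on ++ pvGapRep gap) br false l
        = pvFinishB (List.foldl pvStepB (on, br, gap) (pvRle l))) ∧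
    (∀ on br gap n, (gap = 0 ∧ on = [] ∨ 0 < gap) → 1 ≤ n → (2 ≤ n ∨ l.head? = some true) →
      pvLoopA (on ++ pvGapRep gap) (br ++ [n]) true l
        = pvFinishB (List.foldl pvStepB (on, br, gap) (pvRleAux true n l))) := by
  induction k with
  | zero =>
    intro l hl
    have hnil : l = [] := List.length_eq_zero_iff.mp (Nat.le_zero.mp hl)
    subst hnil
    constructor
    · intro on br gap hg
      rcases hg with ⟨h0, hon⟩ | hpos <;> simp_all [pvLoopA, pvRle, pvFinishB, pvGapRep]
    · intro on br gap n hg hn1 hn2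
      have h2 : 2 ≤ n := by cases hn2 with | inl h => exact h | inr h => simp at h
      rcases hg with ⟨h0, hon⟩ | hpos <;>
        simp_all [pvLoopA, pvRleAux, pvStepB, pvFinishB, pvGapRep]
  | succ k IH =>
    intro l hl
    constructor
    · intro on br gap hg
      cases l with
      | nil =>
        rcases hg with ⟨h0, hon⟩ | hpos <;> simp_all [pvLoopA, pvRle, pvFinishB, pvGapRep]
      | cons x rest =>
        have hrest := IH rest (by simp at hl; omega)
        cases x with
        | false =>
          simp only [pvLoopA, Bool.false_eq_true, reduceIte, Bool.not_false,
            pvOnInc_gapRep on gap hg]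
          rw [hrest.1 on br (gap + 1) (Or.inr (by omega)),
            show pvRle (false :: rest) = pvRleAux false 1 rest from rfl, pvStepB_false]
        | true =>
          by_cases hnext : rest.head?.getD false = true
          · -- start of a break run
            have hh : rest.head? = some true := by
              cases h : rest.head? with
              | none => rw [h] at hnext; simp at hnext
              | some a => rw [h] at hnext; simp at hnext; simp [hnext]
            simp only [pvLoopA, reduceIte, hnext]
            rw [hrest.2 on br gap 1 hg (by omega) (Or.inr hh)]
            rfl
          · -- lone truthy sample: counts into the gap
            simp only [pvLoopA, reduceIte, hnext, pvOnInc_gapRep on gap hg]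
            rw [hrest.1 on br (gap + 1) (Or.inr (by omega))]
            -- B side: the head run is (true,1), folding it adds 1 to the gap
            cases rest with
            | nil => simp [pvRle, pvRleAux, pvStepB, pvFinishB]
            | cons y ys =>
              have hy : y = false := by
                cases y
                · rfl
                · simp at hnext
              subst hy
              rw [show pvRle (true :: false :: ys) = (true, 1) :: pvRleAux false 1 ys from by
                  simp [pvRle, pvRleAux],
                show pvRle (false :: ys) = pvRleAux false 1 ys from rfl]
              simp [pvStepB]
    · intro on br gap n hg hn1 hn2
      cases l with
      | nil =>
        have h2 : 2 ≤ n := by cases hn2 with | inl h => exact h | inr h => simp at h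
        rcases hg with ⟨h0, hon⟩ | hpos <;>
          simp_all [pvLoopA, pvRleAux, pvStepB, pvFinishB, pvGapRep]
      | cons y ys =>
        have hrest := IH ys (by simp at hl; omega)
        cases y with
        | true =>
          simp only [pvLoopA, reduceIte, pvIncLast_append]
          rw [hrest.2 on br gap (n + 1) hg (by omega) (Or.inl (by omega)),
            show pvRleAux true n (true :: ys) = pvRleAux true (n + 1) ys from by
              simp [pvRleAux]]
        | false =>
          have h2 : 2 ≤ n := by cases hn2 with | inl h => exact h | inr h => simp at h
          -- A: the break ends, a fresh onscreen entry [1] starts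
          simp only [pvLoopA, Bool.false_eq_true, reduceIte, Bool.not_true]
          rw [show ((on ++ pvGapRep gap) ++ [1] : List Int)
                = (on ++ pvGapRep gap) ++ pvGapRep 1 from by simp [pvGapRep]]
          rw [hrest.1 (on ++ pvGapRep gap) (br ++ [n]) 1 (Or.inr (by omega))]
          -- B: the run (true, n) flushes the gap and appends n to breaks_time
          rw [show pvRleAux true n (false :: ys) = (true, n) :: pvRleAux false 1 ys from by
            simp [pvRleAux]]
          have hstep : pvStepB (on, br, gap) (true, n) = (on ++ pvGapRep gap, br ++ [n], 0) := by
            rcases hg with ⟨h0, hon⟩ | hpos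
            · subst h0; subst hon; simp [pvStepB, pvGapRep, h2]
            · simp [pvStepB, pvGapRep, h2, if_pos hpos]
          simp only [List.foldl_cons, hstep]
          rw [pvStepB_false]
          norm_num

-- ===== VERDICT (by name: the statement is the Claim_ definition above) =====
theorem get_onscreen_and_break_spec : Claim_equal_get_onscreen_and_break := by
  intro low _ _
  unfold Spec_get_onscreen_and_break get_onscreen_and_break get_onscreen_and_break_alt
  have := ((pvMain low.length low le_rfl).1) [] [] 0 (Or.inl ⟨rfl, rfl⟩)
  simpa [pvGapRep] using this
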